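-- pv_equiv track=rewrite | github.com/Yryft/Price-data-project | fetch_data.py | strip_reforge
-- ===== SOURCE A (Python) =====
-- reforges = {
--     "armor": [
--         "Clean", "Fierce", "Heavy", "Light", "Mythic", "Pure", "Smart", "Titanic", "Wise", "Ancient", "Bustling",
--         "Candied", "Cubic", "Dimensional", "Empowered", "Festive", "Hyper", "Giant", "Jaded", "Mossy", "Necrotic",
--         "Perfect", "Reinforced", "Renowned", "Spiked", "Submerged", "Undead", "Loving", "Ridiculous", "Greater Spook", "Calcified"
--     ],
--     "weapon": [
--         "Epic", "Fair", "Fast", "Gentle", "Heroic", "Legendary", "Odd", "Sharp", "Spicy", "Coldfused", "Dirty",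
--         "Fabled", "Gilded", "Suspicious", "Warped", "Withered", "Bulky", "Jerry's", "Fanged",
--         "Awkward", "Deadly", "Fine", "Grand", "Hasty", "Neat", "Rapid", "Rich", "Unreal", "Headstrong",
--         "Precise", "Spiritual"
--     ],
--     "misc": [
--         "Stained", "Menacing", "Hefty", "Soft", "Honored", "Blended", "Astute", "Colossal", "Brilliant", "Blazing",
--         "Blooming", "Fortified", "Glistening", "Rooted", "Royal", "Snowy", "Strengthened", "Waxed", "Blood-Soaked",
--         "Greater Spook", "Epic", "Fair", "Fast", "Gentle", "Heroic", "Legendary", "Odd", "Sharp", "Spicy", "Salty",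
--         "Treacherous", "Lucky", "Stiff", "Dirty", "Chomp", "Pitchin'", "Unyielding", "Prospector's", "Excellent",
--         "Sturdy", "Fortunate", "Ambered", "Auspicious", "Fleet", "Glacial", "Heated", "Lustrous", "Magnetic",
--         "Mithraic", "Refined", "Scraped", "Stellar", "Fruitful", "Great", "Rugged", "Lush", "Lumberjack's",
--         "Double-Bit", "Moil", "Toil", "Blessed", "Earthy", "Robust", "Zooming", "Peasant's", "Green Thumb",
--         "Blessed", "Bountiful", "Beady", "Buzzing"
--     ]
-- }
--
-- special_cases = {
--     "Very Wise Dragon Armor": "Wise Dragon Armor",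
--     "Very Strong Dragon Armor": "Strong Dragon Armor",
--     "Highly Superior Dragon Armor": "Superior Dragon Armor",
--     "Extremely Heavy Armor": "Heavy Armor",
--     "Not So Light Armor": "Heavy Armor",
--     "Thicc Heavy Armor": "Super Heavy Armor",
--     "Absolutely Perfect Armor": "Perfect Armor",
--     "Even More Refined Mithril Pickaxe": "Refined Mithril Pickaxe",
--     "Even More Refined Titanium Pickaxe": "Refined Titanium Pickaxe",
--     "Greater Greater Spook Armor": "Great Spook Armor"
-- }
--
-- def strip_reforge(item_name, category):
--     # Check known special cases first
--     if item_name in special_cases: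
--         return special_cases[item_name]
--
--     reforges_list = []
--     if category == "armor":
--         reforges_list = reforges["armor"]
--     elif category == "weapon":
--         reforges_list = reforges["weapon"]
--     else:
--         reforges_list = reforges["misc"]
--
--     for prefix in reforges_list:
--         if item_name.startswith(prefix + " "):
--             return item_name[len(prefix) + 1:]  # Remove reforge and following space
--     return item_name  # No reforge found, return unchanged
-- ===== SOURCE B (Python) =====
-- special_cases = {
--     "Very Wise Dragon Armor": "Wise Dragon Armor",
--     "Very Strong Dragon Armor": "Strong Dragon Armor",
--     "Highly Superior Dragon Armor": "Superior Dragon Armor",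
--     "Extremely Heavy Armor": "Heavy Armor",
--     "Not So Light Armor": "Heavy Armor",
--     "Thicc Heavy Armor": "Super Heavy Armor",
--     "Absolutely Perfect Armor": "Perfect Armor",
--     "Even More Refined Mithril Pickaxe": "Refined Mithril Pickaxe",
--     "Even More Refined Titanium Pickaxe": "Refined Titanium Pickaxe",
--     "Greater Greater Spook Armor": "Great Spook Armor"
-- }
--
-- # Per-category index keyed by the reforge's FIRST word; the value is the required
-- # second word ("" for a one-word reforge).  First words are unique per category,
-- # so the name's own first word decides everything with two dict lookups.
-- REFORGE_INDEX = {
--     "armor": {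
--         "Clean": "", "Fierce": "", "Heavy": "", "Light": "", "Mythic": "", "Pure": "", "Smart": "",
--         "Titanic": "", "Wise": "", "Ancient": "", "Bustling": "", "Candied": "", "Cubic": "",
--         "Dimensional": "", "Empowered": "", "Festive": "", "Hyper": "", "Giant": "", "Jaded": "",
--         "Mossy": "", "Necrotic": "", "Perfect": "", "Reinforced": "", "Renowned": "", "Spiked": "",
--         "Submerged": "", "Undead": "", "Loving": "", "Ridiculous": "", "Greater": "Spook",
--         "Calcified": ""
--     },
--     "weapon": {
--         "Epic": "", "Fair": "", "Fast": "", "Gentle": "", "Heroic": "", "Legendary": "", "Odd": "",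
--         "Sharp": "", "Spicy": "", "Coldfused": "", "Dirty": "", "Fabled": "", "Gilded": "",
--         "Suspicious": "", "Warped": "", "Withered": "", "Bulky": "", "Jerry's": "", "Fanged": "",
--         "Awkward": "", "Deadly": "", "Fine": "", "Grand": "", "Hasty": "", "Neat": "", "Rapid": "",
--         "Rich": "", "Unreal": "", "Headstrong": "", "Precise": "", "Spiritual": ""
--     },
--     "misc": {
--         "Stained": "", "Menacing": "", "Hefty": "", "Soft": "", "Honored": "", "Blended": "",
--         "Astute": "", "Colossal": "", "Brilliant": "", "Blazing": "", "Blooming": "",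
--         "Fortified": "", "Glistening": "", "Rooted": "", "Royal": "", "Snowy": "",
--         "Strengthened": "", "Waxed": "", "Blood-Soaked": "", "Greater": "Spook", "Epic": "",
--         "Fair": "", "Fast": "", "Gentle": "", "Heroic": "", "Legendary": "", "Odd": "", "Sharp": "",
--         "Spicy": "", "Salty": "", "Treacherous": "", "Lucky": "", "Stiff": "", "Dirty": "",
--         "Chomp": "", "Pitchin'": "", "Unyielding": "", "Prospector's": "", "Excellent": "",
--         "Sturdy": "", "Fortunate": "", "Ambered": "", "Auspicious": "", "Fleet": "", "Glacial": "",
--         "Heated": "", "Lustrous": "", "Magnetic": "", "Mithraic": "", "Refined": "", "Scraped": "",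
--         "Stellar": "", "Fruitful": "", "Great": "", "Rugged": "", "Lush": "", "Lumberjack's": "",
--         "Double-Bit": "", "Moil": "", "Toil": "", "Blessed": "", "Earthy": "", "Robust": "",
--         "Zooming": "", "Peasant's": "", "Green": "Thumb", "Bountiful": "", "Beady": "",
--         "Buzzing": ""
--     },
-- }
--
-- def strip_reforge(item_name, category):
--     # Check known special cases first
--     if item_name in special_cases:
--         return special_cases[item_name]
--
--     idx = REFORGE_INDEX.get(category, REFORGE_INDEX["misc"])
--
--     i = item_name.find(" ")
--     if i < 0:
--         return item_name  # no space, no reforge prefix possible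
--     sec = idx.get(item_name[:i])
--     if sec is None:
--         return item_name  # first word is not a reforge word
--     if sec == "":
--         return item_name[i + 1:]  # one-word reforge stripped
--     k = item_name[i + 1:].find(" ")
--     if k >= 0 and item_name[i + 1:i + 1 + k] == sec:
--         return item_name[i + 1 + k + 1:]  # two-word reforge stripped
--     return item_name
-- ===== Notes on version B (the rewrite author's own statement) =====
-- stated objective: alternative
-- what changed: Replaces A's ordered startswith-scan over the whole category prefix list by a per-category dict keyed by each reforge's first word (value = required second word, empty for one-word reforges), so the name's own first word drives two direct lookups instead of a linear scan.
import Mathlib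
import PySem

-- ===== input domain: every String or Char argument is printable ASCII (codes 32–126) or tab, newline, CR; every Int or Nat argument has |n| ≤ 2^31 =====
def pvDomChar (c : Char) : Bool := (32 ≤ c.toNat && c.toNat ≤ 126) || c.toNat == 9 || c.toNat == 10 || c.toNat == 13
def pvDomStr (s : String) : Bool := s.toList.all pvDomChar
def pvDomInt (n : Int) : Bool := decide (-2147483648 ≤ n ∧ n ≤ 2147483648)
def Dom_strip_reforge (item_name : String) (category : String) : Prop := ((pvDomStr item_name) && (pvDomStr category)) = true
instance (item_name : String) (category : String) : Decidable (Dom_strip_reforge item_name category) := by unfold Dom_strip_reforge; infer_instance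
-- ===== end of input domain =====

-- B replaces A's prefix-by-prefix startswith scan by a per-category dict keyed by the reforge's
-- FIRST word (value = required second word, "" if none): two dict lookups driven by the name's
-- own first word instead of a scan over the whole prefix list (objective: alternative).

-- ===== PORT A =====
def specialCases : PySem.Dict String String := PySem.Dict.ofList [
  ("Very Wise Dragon Armor", "Wise Dragon Armor"),
  ("Very Strong Dragon Armor", "Strong Dragon Armor"),
  ("Highly Superior Dragon Armor", "Superior Dragon Armor"),
  ("Extremely Heavy Armor", "Heavy Armor"),
  ("Not So Light Armor", "Heavy Armor"),
  ("Thicc Heavy Armor", "Super Heavy Armor"),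
  ("Absolutely Perfect Armor", "Perfect Armor"),
  ("Even More Refined Mithril Pickaxe", "Refined Mithril Pickaxe"),
  ("Even More Refined Titanium Pickaxe", "Refined Titanium Pickaxe"),
  ("Greater Greater Spook Armor", "Great Spook Armor")]

def reforgesArmor : List String := ["Clean", "Fierce", "Heavy", "Light", "Mythic", "Pure", "Smart", "Titanic", "Wise", "Ancient", "Bustling", "Candied", "Cubic", "Dimensional", "Empowered", "Festive", "Hyper", "Giant", "Jaded", "Mossy", "Necrotic", "Perfect", "Reinforced", "Renowned", "Spiked", "Submerged", "Undead", "Loving", "Ridiculous", "Greater Spook", "Calcified"]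
def reforgesWeapon : List String := ["Epic", "Fair", "Fast", "Gentle", "Heroic", "Legendary", "Odd", "Sharp", "Spicy", "Coldfused", "Dirty", "Fabled", "Gilded", "Suspicious", "Warped", "Withered", "Bulky", "Jerry's", "Fanged", "Awkward", "Deadly", "Fine", "Grand", "Hasty", "Neat", "Rapid", "Rich", "Unreal", "Headstrong", "Precise", "Spiritual"]
def reforgesMisc : List String := ["Stained", "Menacing", "Hefty", "Soft", "Honored", "Blended", "Astute", "Colossal", "Brilliant", "Blazing", "Blooming", "Fortified", "Glistening", "Rooted", "Royal", "Snowy", "Strengthened", "Waxed", "Blood-Soaked", "Greater Spook", "Epic", "Fair", "Fast", "Gentle", "Heroic", "Legendary", "Odd", "Sharp", "Spicy", "Salty", "Treacherous", "Lucky", "Stiff", "Dirty", "Chomp", "Pitchin'", "Unyielding", "Prospector's", "Excellent", "Sturdy", "Fortunate", "Ambered", "Auspicious", "Fleet", "Glacial", "Heated", "Lustrous", "Magnetic", "Mithraic", "Refined", "Scraped", "Stellar", "Fruitful", "Great", "Rugged", "Lush", "Lumberjack's", "Double-Bit", "Moil", "Toil", "Blessed", "Earthy", "Robust", "Zooming",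 "Peasant's", "Green Thumb", "Blessed", "Bountiful", "Beady", "Buzzing"]

-- the for-loop over the category's prefix list
def stripLoop (item_name : String) : List String → String
  | [] => item_name
  | p :: rest =>
    if PySem.Str.startswith item_name (p ++ " ") then
      PySem.Str.slice item_name (some (PySem.Str.len p + 1)) none
    else stripLoop item_name rest

def strip_reforge (item_name : String) (category : String) : String :=
  match specialCases.get? item_name with
  | some v => v
  | none =>
    let reforges_list :=
      if category == "armor" then reforgesArmor
      else if category == "weapon" then reforgesWeapon
      else reforgesMisc
    stripLoop item_name reforges_list

-- ===== PORT B =====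
-- Source B's REFORGE_INDEX: per category, first word of each reforge ↦ required second word ("" if none)
def idxArmor : PySem.Dict String String := PySem.Dict.ofList [
  ("Clean", ""), ("Fierce", ""), ("Heavy", ""), ("Light", ""), ("Mythic", ""), ("Pure", ""),
  ("Smart", ""), ("Titanic", ""), ("Wise", ""), ("Ancient", ""), ("Bustling", ""), ("Candied", ""),
  ("Cubic", ""), ("Dimensional", ""), ("Empowered", ""), ("Festive", ""), ("Hyper", ""), ("Giant", ""),
  ("Jaded", ""), ("Mossy", ""), ("Necrotic", ""), ("Perfect", ""), ("Reinforced", ""), ("Renowned", ""),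
  ("Spiked", ""), ("Submerged", ""), ("Undead", ""), ("Loving", ""), ("Ridiculous", ""),
  ("Greater", "Spook"), ("Calcified", "")]
def idxWeapon : PySem.Dict String String := PySem.Dict.ofList [
  ("Epic", ""), ("Fair", ""), ("Fast", ""), ("Gentle", ""), ("Heroic", ""), ("Legendary", ""),
  ("Odd", ""), ("Sharp", ""), ("Spicy", ""), ("Coldfused", ""), ("Dirty", ""), ("Fabled", ""),
  ("Gilded", ""), ("Suspicious", ""), ("Warped", ""), ("Withered", ""), ("Bulky", ""), ("Jerry's", ""),
  ("Fanged", ""), ("Awkward", ""), ("Deadly", ""), ("Fine", ""), ("Grand", ""), ("Hasty", ""),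
  ("Neat", ""), ("Rapid", ""), ("Rich", ""), ("Unreal", ""), ("Headstrong", ""), ("Precise", ""),
  ("Spiritual", "")]
def idxMisc : PySem.Dict String String := PySem.Dict.ofList [
  ("Stained", ""), ("Menacing", ""), ("Hefty", ""), ("Soft", ""), ("Honored", ""), ("Blended", ""),
  ("Astute", ""), ("Colossal", ""), ("Brilliant", ""), ("Blazing", ""), ("Blooming", ""),
  ("Fortified", ""), ("Glistening", ""), ("Rooted", ""), ("Royal", ""), ("Snowy", ""),
  ("Strengthened", ""), ("Waxed", ""), ("Blood-Soaked", ""), ("Greater", "Spook"), ("Epic", ""),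
  ("Fair", ""), ("Fast", ""), ("Gentle", ""), ("Heroic", ""), ("Legendary", ""), ("Odd", ""),
  ("Sharp", ""), ("Spicy", ""), ("Salty", ""), ("Treacherous", ""), ("Lucky", ""), ("Stiff", ""),
  ("Dirty", ""), ("Chomp", ""), ("Pitchin'", ""), ("Unyielding", ""), ("Prospector's", ""),
  ("Excellent", ""), ("Sturdy", ""), ("Fortunate", ""), ("Ambered", ""), ("Auspicious", ""),
  ("Fleet", ""), ("Glacial", ""), ("Heated", ""), ("Lustrous", ""), ("Magnetic", ""),
  ("Mithraic", ""), ("Refined", ""), ("Scraped", ""), ("Stellar", ""), ("Fruitful", ""),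
  ("Great", ""), ("Rugged", ""), ("Lush", ""), ("Lumberjack's", ""), ("Double-Bit", ""),
  ("Moil", ""), ("Toil", ""), ("Blessed", ""), ("Earthy", ""), ("Robust", ""), ("Zooming", ""),
  ("Peasant's", ""), ("Green", "Thumb"), ("Bountiful", ""), ("Beady", ""), ("Buzzing", "")]

def reforgeIndex : PySem.Dict String (PySem.Dict String String) :=
  PySem.Dict.ofList [("armor", idxArmor), ("weapon", idxWeapon), ("misc", idxMisc)]

def strip_reforge_alt (item_name : String) (category : String) : String :=
  match specialCases.get? item_name with
  | some v => v
  | none =>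
    let idx := (reforgeIndex.get? category).getD ((reforgeIndex.get? "misc").getD PySem.Dict.empty)
    let i := PySem.Str.find item_name " "
    if i < 0 then item_name
    else
      match idx.get? (PySem.Str.slice item_name none (some i)) with
      | none => item_name
      | some sec =>
        if sec == "" then PySem.Str.slice item_name (some (i + 1)) none
        else
          let k := PySem.Str.find (PySem.Str.slice item_name (some (i + 1)) none) " "
          if 0 ≤ k then
            if PySem.Str.slice item_name (some (i + 1)) (some (i + 1 + k)) == sec then
              PySem.Str.slice item_name (some (i + 1 + k + 1)) none
            else item_name
          else item_name

-- ===== PRECONDITION & SPEC =====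
def Spec_strip_reforge (item_name : String) (category : String) (out : String) : Prop := out = strip_reforge_alt item_name category
instance (item_name : String) (category : String) (out : String) : Decidable (Spec_strip_reforge item_name category out) := by unfold Spec_strip_reforge; infer_instance

-- ===== CLAIM (what is proved, stated in full; the proofs are below) =====
def Claim_equal_strip_reforge : Prop := ∀ (item_name : String) (category : String), Dom_strip_reforge item_name category → Spec_strip_reforge item_name category (strip_reforge item_name category)

-- ===== LEMMAS AND PROOFS =====
-- first word of a char list (up to the first space), if it contains a space at all
def word1 : List Char → Option (List Char)
  | [] => none
  | c :: cs => if c = ' ' then some [] else (word1 cs).map (c :: ·)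

theorem word1_none_iff (cs : List Char) : word1 cs = none ↔ ' ' ∉ cs := by
  induction cs with
  | nil => simp [word1]
  | cons c cs ih =>
    by_cases h : c = ' ' <;> simp [word1, h, ih, Option.map_eq_none_iff]
    · intro h'; exact fun e => h e.symm

theorem word1_some (cs u : List Char) (h : word1 cs = some u) :
    cs = u ++ ' ' :: cs.drop (u.length + 1) ∧ ' ' ∉ u := by
  induction cs generalizing u with
  | nil => simp [word1] at h
  | cons c cs ih =>
    by_cases hc : c = ' '
    · simp [word1, hc] at h; subst h; simp [hc]
    · simp [word1, hc] at h
      obtain ⟨u', hu', rfl⟩ := h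
      obtain ⟨h1, h2⟩ := ih u' hu'
      constructor
      · simpa using h1
      · simp [h2]; exact fun e => hc (Eq.symm e)

theorem word1_append (u t : List Char) (hu : ' ' ∉ u) : word1 (u ++ ' ' :: t) = some u := by
  induction u with
  | nil => simp [word1]
  | cons c u ih =>
    simp at hu
    have hc : ¬ c = ' ' := fun e => hu.1 (Eq.symm e)
    simp [word1, hc, ih hu.2]

theorem prefix_word1 (p cs : List Char) (hp : ' ' ∉ p) :
    (p ++ [' ']) <+: cs ↔ word1 cs = some p := by
  constructor
  · rintro ⟨t, ht⟩
    subst ht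
    simpa using word1_append p t hp
  · intro h
    obtain ⟨h1, -⟩ := word1_some cs p h
    exact ⟨cs.drop (p.length + 1), by simpa using h1.symm⟩

theorem prefix_append_iff' (a b c : List Char) :
    (a ++ b) <+: c ↔ a <+: c ∧ b <+: c.drop a.length := by
  constructor
  · rintro ⟨t, rfl⟩
    exact ⟨⟨b ++ t, by simp⟩, ⟨t, by simp⟩⟩
  · rintro ⟨⟨t, rfl⟩, hb⟩
    rw [List.drop_left] at hb
    obtain ⟨r, rfl⟩ := hb
    exact ⟨r, by simp⟩

theorem prefix_word2 (u v cs : List Char) (hu : ' ' ∉ u) (hv : ' ' ∉ v) :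
    ((u ++ ' ' :: v) ++ [' ']) <+: cs ↔
      (word1 cs = some u ∧ word1 (cs.drop (u.length + 1)) = some v) := by
  have he : (u ++ ' ' :: v) ++ [' '] = (u ++ [' ']) ++ (v ++ [' ']) := by simp
  rw [he, prefix_append_iff']
  simp [prefix_word1 _ _ hu, prefix_word1 _ _ hv]

theorem find_space_none (cs : List Char) (h : word1 cs = none) :
    PySem.Chars.find cs [' '] = -1 := by
  rw [PySem.Chars.find_eq_neg_one_iff, List.singleton_infix_iff]
  rwa [word1_none_iff] at h

theorem find_space_some (cs u : List Char) (h : word1 cs = some u) :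
    PySem.Chars.find cs [' '] = (u.length : Int) := by
  obtain ⟨hstruct, hu⟩ := word1_some cs u h
  set rest := cs.drop (u.length + 1) with hrest
  have hne : PySem.Chars.find cs [' '] ≠ -1 := by
    intro hn
    rw [PySem.Chars.find_eq_neg_one_iff, List.singleton_infix_iff] at hn
    exact hn (by rw [hstruct]; simp)
  have hspec := PySem.Chars.findFrom_natCast_spec cs [' '] 0 (Nat.zero_le _)
    (by simp only [Nat.cast_zero, PySem.Chars.findFrom_zero]; exact hne)
  simp only [Nat.cast_zero, PySem.Chars.findFrom_zero] at hspec
  obtain ⟨h0, hpre, hmin⟩ := hspec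
  set n := (PySem.Chars.find cs [' ']).toNat with hn
  have hdropu : cs.drop u.length = ' ' :: rest := by
    conv_lhs => rw [hstruct]
    rw [show u ++ ' ' :: rest = u ++ (' ' :: rest) from rfl, List.drop_left]
  have hle : n ≤ u.length := by
    by_contra hgt
    exact hmin u.length (Nat.zero_le _) (by omega) (by rw [hdropu]; exact ⟨rest, rfl⟩)
  have heq : n = u.length := by
    rcases Nat.lt_or_ge n u.length with hlt | hge
    · exfalso
      have hd : cs.drop n = u.drop n ++ ' ' :: rest := by
        conv_lhs => rw [hstruct]
        rw [List.drop_append_of_le_length (by omega)]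
      obtain ⟨t, ht⟩ := hpre
      rw [hd] at ht
      have hun : u.drop n ≠ [] := by
        intro h0'; have := congrArg List.length h0'; simp at this; omega
      obtain ⟨c, us, hus⟩ := List.exists_cons_of_ne_nil hun
      have hc : c = ' ' := by
        rw [hus] at ht; simpa using congrArg (·.head?) ht.symm
      have hcm : c ∈ u := by
        have : c ∈ u.drop n := by rw [hus]; exact List.mem_cons_self
        exact List.mem_of_mem_drop this
      rw [hc] at hcm; exact hu hcm
    · omega
  omega

-- char-level model of A's loop
def scanC (cs : List Char) : List (List Char) → List Char
  | [] => cs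
  | p :: rest => if (p ++ [' ']) <+: cs then cs.drop (p.length + 1) else scanC cs rest

-- plain first-match association lookup at char level
def lookupA : List (List Char × List Char) → List Char → Option (List Char)
  | [], _ => none
  | e :: rest, u => if e.1 = u then some e.2 else lookupA rest u

-- char-level model of B's two dict lookups
def DcoreC (cs : List Char) (idx : List (List Char × List Char)) : List Char :=
  match word1 cs with
  | none => cs
  | some u =>
    match lookupA idx u with
    | none => cs
    | some sec =>
      if sec = [] then cs.drop (u.length + 1)
      else
        match word1 (cs.drop (u.length + 1)) with
        | none => cs
        | some v => if v = sec then (cs.drop (u.length + 1)).drop (v.length + 1) else cs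

-- the shape invariant tying a category's prefix list ps to its first-word index idx
def okP (idx : List (List Char × List Char)) (p : List Char) : Bool :=
  if ' ' ∈ p then
    decide (' ' ∉ p.drop ((p.takeWhile (fun c => !(c == ' '))).length + 1)) &&
    decide (p.drop ((p.takeWhile (fun c => !(c == ' '))).length + 1) ≠ []) &&
    decide (p = p.takeWhile (fun c => !(c == ' ')) ++ ' ' :: p.drop ((p.takeWhile (fun c => !(c == ' '))).length + 1)) &&
    decide (lookupA idx (p.takeWhile (fun c => !(c == ' '))) = some (p.drop ((p.takeWhile (fun c => !(c == ' '))).length + 1)))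
  else decide (lookupA idx p = some [])

def okE (ps : List (List Char)) (e : List Char × List Char) : Bool :=
  decide (' ' ∉ e.1) &&
  (if e.2 = [] then decide (e.1 ∈ ps)
   else decide (' ' ∉ e.2) && decide ((e.1 ++ ' ' :: e.2) ∈ ps))

theorem lookupA_mem (idx : List (List Char × List Char)) (u v : List Char)
    (h : lookupA idx u = some v) : (u, v) ∈ idx := by
  induction idx with
  | nil => simp [lookupA] at h
  | cons e rest ih =>
    by_cases he : e.1 = u
    · simp [lookupA, he] at h
      subst he; subst h
      exact List.mem_cons_self
    · simp [lookupA, he] at h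
      exact List.mem_cons_of_mem _ (ih h)

theorem space_not_mem_takeWhile (p : List Char) :
    ' ' ∉ p.takeWhile (fun c => !(c == ' ')) := by
  intro h
  have := List.mem_takeWhile_imp h
  simp at this

theorem scan_none (ps : List (List Char)) (cs : List Char)
    (h : ∀ p ∈ ps, ¬ (p ++ [' ']) <+: cs) : scanC cs ps = cs := by
  induction ps with
  | nil => rfl
  | cons p rest ih =>
    simp only [scanC, if_neg (h p (by simp))]
    exact ih (fun q hq => h q (by simp [hq]))

theorem scan_unique (ps : List (List Char)) (cs p : List Char)
    (hp : p ∈ ps) (hm : (p ++ [' ']) <+: cs)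
    (hu : ∀ q ∈ ps, (q ++ [' ']) <+: cs → q = p) :
    scanC cs ps = cs.drop (p.length + 1) := by
  induction ps with
  | nil => simp at hp
  | cons q rest ih =>
    by_cases hq : (q ++ [' ']) <+: cs
    · simp only [scanC, if_pos hq]
      rw [hu q (by simp) hq]
    · simp only [scanC, if_neg hq]
      rcases List.mem_cons.mp hp with rfl | hp'
      · exact absurd hm hq
      · exact ih hp' (fun r hr => hu r (by simp [hr]))

-- a prefix-list element matching cs forces cs's first (and, if two-word, second) word
theorem match_shape (idx : List (List Char × List Char)) (p cs : List Char)
    (hok : okP idx p = true) (hpre : (p ++ [' ']) <+: cs) :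
    (' ' ∉ p ∧ word1 cs = some p ∧ lookupA idx p = some []) ∨
    (∃ w r, p = w ++ ' ' :: r ∧ ' ' ∉ w ∧ ' ' ∉ r ∧ r ≠ [] ∧ lookupA idx w = some r ∧
      word1 cs = some w ∧ word1 (cs.drop (w.length + 1)) = some r) := by
  by_cases hsp : ' ' ∈ p
  · right
    rw [okP, if_pos hsp] at hok
    simp only [Bool.and_eq_true, decide_eq_true_eq] at hok
    obtain ⟨⟨⟨hr, hne⟩, hshape⟩, hlook⟩ := hok
    set w := p.takeWhile (fun c => !(c == ' ')) with hw
    set r := p.drop (w.length + 1) with hrd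
    have hwsp : ' ' ∉ w := space_not_mem_takeWhile p
    rw [hshape] at hpre
    obtain ⟨h1, h2⟩ := (prefix_word2 w r cs hwsp hr).mp hpre
    exact ⟨w, r, hshape, hwsp, hr, hne, hlook, h1, h2⟩
  · left
    rw [okP, if_neg hsp] at hok
    exact ⟨hsp, (prefix_word1 p cs hsp).mp hpre, of_decide_eq_true hok⟩

theorem scan_eq (ps : List (List Char)) (idx : List (List Char × List Char))
    (Hps : ∀ p ∈ ps, okP idx p = true) (Hidx : ∀ e ∈ idx, okE ps e = true) (cs : List Char) :
    scanC cs ps = DcoreC cs idx := by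
  rcases hw1 : word1 cs with _ | u
  · rw [scan_none]
    · simp [DcoreC, hw1]
    · intro p hp hpre
      rcases match_shape idx p cs (Hps p hp) hpre with ⟨-, h, -⟩ | ⟨w, r, -, -, -, -, -, h, -⟩ <;>
        rw [hw1] at h <;> cases h
  · have hu : ' ' ∉ u := (word1_some cs u hw1).2
    rcases hlook : lookupA idx u with _ | sec
    · rw [scan_none]
      · simp [DcoreC, hw1, hlook]
      · intro p hp hpre
        rcases match_shape idx p cs (Hps p hp) hpre with ⟨-, h, hl⟩ | ⟨w, r, -, -, -, -, hl, h, -⟩ <;>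
          rw [hw1] at h <;> injection h with h <;> subst h
        · rw [hlook] at hl; cases hl
        · rw [hlook] at hl; cases hl
    · have hmem := Hidx (u, sec) (lookupA_mem idx u sec hlook)
      by_cases hsec : sec = []
      · subst hsec
        have hone : u ∈ ps := by
          simp only [okE, Bool.and_eq_true, decide_eq_true_eq] at hmem
          simpa using hmem.2
        rw [scan_unique ps cs u hone ((prefix_word1 _ _ hu).mpr hw1) ?_]
        · simp [DcoreC, hw1, hlook]
        · intro q hq hqpre
          rcases match_shape idx q cs (Hps q hq) hqpre with ⟨-, h, -⟩ | ⟨w, r, hsh, -, -, hne, hl, h, -⟩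
          · rw [hw1] at h; exact (Option.some.inj h).symm
          · rw [hw1] at h; injection h with h; subst h
            exact absurd (Option.some.inj (hlook.symm.trans hl)).symm hne
      · obtain ⟨hsecsp, hPmem⟩ : ' ' ∉ sec ∧ (u ++ ' ' :: sec) ∈ ps := by
          simp only [okE, Bool.and_eq_true, decide_eq_true_eq, if_neg hsec] at hmem
          exact hmem.2
        rcases hw2 : word1 (cs.drop (u.length + 1)) with _ | v
        · rw [scan_none]
          · simp [DcoreC, hw1, hlook, if_neg hsec, hw2]
          · intro q hq hqpre
            rcases match_shape idx q cs (Hps q hq) hqpre with ⟨-, h, hl⟩ | ⟨w, r, -, -, -, -, -, h, h2⟩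
            · rw [hw1] at h; injection h with h; subst h
              exact hsec (Option.some.inj (hlook.symm.trans hl))
            · rw [hw1] at h; injection h with h; subst h
              rw [hw2] at h2; cases h2
        · by_cases hv : v = sec
          · subst hv
            have hPpre : ((u ++ ' ' :: v) ++ [' ']) <+: cs :=
              (prefix_word2 u v cs hu hsecsp).mpr ⟨hw1, hw2⟩
            rw [scan_unique ps cs (u ++ ' ' :: v) hPmem hPpre ?_]
            · simp only [DcoreC, hw1, hlook, if_neg hsec, hw2]
              rw [List.drop_drop]
              congr 1
              simp
              omega
            · intro q hq hqpre
              rcases match_shape idx q cs (Hps q hq) hqpre with ⟨-, h, hl⟩ | ⟨w, r, hsh, -, -, -, hl, h, h2⟩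
              · rw [hw1] at h; injection h with h; subst h
                exact absurd (Option.some.inj (hlook.symm.trans hl)) hsec
              · rw [hw1] at h; injection h with h; subst h
                have hsr : v = r := Option.some.inj (hlook.symm.trans hl)
                rw [hsh, ← hsr]
          · rw [scan_none]
            · simp [DcoreC, hw1, hlook, if_neg hsec, hw2, if_neg hv]
            · intro q hq hqpre
              rcases match_shape idx q cs (Hps q hq) hqpre with ⟨-, h, hl⟩ | ⟨w, r, -, -, -, -, hl, h, h2⟩
              · rw [hw1] at h; injection h with h; subst h
                exact hsec (Option.some.inj (hlook.symm.trans hl))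
              · rw [hw1] at h; injection h with h; subst h
                have hsr : sec = r := Option.some.inj (hlook.symm.trans hl)
                rw [hw2] at h2; injection h2 with h2
                exact hv (h2.trans hsr.symm)

-- String ↔ List Char bridges
theorem startswith_bridge (s p : String) :
    (PySem.Str.startswith s (p ++ " ") = true) ↔ (p.toList ++ [' ']) <+: s.toList := by
  rw [PySem.Str.startswith_eq, PySem.Chars.startswith_iff]
  simp [String.toList_append]

theorem slice_from_bridge (s : String) (a : Int) (n : Nat) (h : a = (n:Int)) :
    (PySem.Str.slice s (some a) none).toList = s.toList.drop n := by
  rw [h]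
  simp only [PySem.Str.toList_slice, PySem.Chars.slice_eq_listSlice, PySem.List.slice_from_natCast]

theorem slice_to_bridge (s : String) (a : Int) (n : Nat) (h : a = (n:Int)) :
    (PySem.Str.slice s none (some a)).toList = s.toList.take n := by
  rw [h]
  simp only [PySem.Str.toList_slice, PySem.Chars.slice_eq_listSlice, PySem.List.slice_to_natCast]

theorem slice_both_bridge (s : String) (a b : Int) (j n : Nat)
    (ha : a = (j:Int)) (hb : b = (j:Int) + (n:Int)) :
    (PySem.Str.slice s (some a) (some b)).toList = (s.toList.drop j).take n := by
  rw [ha, hb]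
  simp only [PySem.Str.toList_slice, PySem.Chars.slice_eq_listSlice, PySem.List.slice_natCast_add]

theorem find_bridge (s : String) : PySem.Str.find s " " = PySem.Chars.find s.toList [' '] := by
  rw [PySem.Str.find_eq]; rfl

theorem len_bridge (p : String) : PySem.Str.len p = (p.toList.length : Int) := by simp [pysem]

-- Dict.get? at String level computes lookupA on the char-level index
def charIdx (d : PySem.Dict String String) : List (List Char × List Char) :=
  d.items.map (fun e => (e.1.toList, e.2.toList))

theorem get?_lookupA (l : List (String × String)) (s : String) :
    ((PySem.Dict.mk l).get? s).map String.toList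
      = lookupA (l.map (fun e => (e.1.toList, e.2.toList))) s.toList := by
  induction l with
  | nil => simp [PySem.Dict.get?, lookupA]
  | cons e rest ih =>
    rcases e with ⟨k, v⟩
    rw [PySem.Dict.get?_mk_cons]
    by_cases hk : k = s
    · subst hk
      simp [lookupA]
    · have hkb : (k == s) = false := by simpa using hk
      have hkc : ¬ k.toList = s.toList := fun h => hk (String.toList_inj.mp h)
      simp [hkb, lookupA, hkc, ih]

theorem get?_charIdx (d : PySem.Dict String String) (s : String) :
    (d.get? s).map String.toList = lookupA (charIdx d) s.toList := by
  rcases d with ⟨l⟩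
  exact get?_lookupA l s

theorem stripLoop_toList (s : String) (ps : List String) :
    (stripLoop s ps).toList = scanC s.toList (ps.map String.toList) := by
  induction ps with
  | nil => rfl
  | cons p rest ih =>
    simp only [stripLoop, List.map, scanC]
    by_cases h : (p.toList ++ [' ']) <+: s.toList
    · rw [if_pos ((startswith_bridge s p).mpr h), if_pos h]
      exact slice_from_bridge s _ (p.toList.length + 1)
        (by rw [len_bridge]; push_cast; ring)
    · rw [if_neg (fun hh => h ((startswith_bridge s p).mp hh)), if_neg h, ih]

-- B's core: the port's body after the special-case guard, with the category index resolved
def DCoreStr (s : String) (d : PySem.Dict String String) : String :=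
  if PySem.Str.find s " " < 0 then s
  else
    match d.get? (PySem.Str.slice s none (some (PySem.Str.find s " "))) with
    | none => s
    | some sec =>
      if sec == "" then PySem.Str.slice s (some (PySem.Str.find s " " + 1)) none
      else
        if 0 ≤ PySem.Str.find (PySem.Str.slice s (some (PySem.Str.find s " " + 1)) none) " " then
          if PySem.Str.slice s (some (PySem.Str.find s " " + 1))
              (some (PySem.Str.find s " " + 1
                + PySem.Str.find (PySem.Str.slice s (some (PySem.Str.find s " " + 1)) none) " ")) == sec then
            PySem.Str.slice s (some (PySem.Str.find s " " + 1
              + PySem.Str.find (PySem.Str.slice s (some (PySem.Str.find s " " + 1)) none) " " + 1)) none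
          else s
        else s

theorem beq_toList (x y : String) : (x == y) = (decide (x.toList = y.toList)) := by
  by_cases h : x = y
  · subst h; simp
  · have : ¬ x.toList = y.toList := fun hh => h (String.toList_inj.mp hh)
    simp [h, this]

theorem DCore_toList (s : String) (d : PySem.Dict String String) :
    (DCoreStr s d).toList = DcoreC s.toList (charIdx d) := by
  rcases hw1 : word1 s.toList with _ | u
  · have hf : PySem.Str.find s " " = -1 := by rw [find_bridge]; exact find_space_none _ hw1
    rw [show DcoreC s.toList (charIdx d) = s.toList by simp [DcoreC, hw1]]
    unfold DCoreStr
    rw [hf]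
    norm_num
  · obtain ⟨hstruct, hu⟩ := word1_some s.toList u hw1
    have hf : PySem.Str.find s " " = (u.length : Int) := by
      rw [find_bridge]; exact find_space_some _ _ hw1
    have hnneg : ¬ ((u.length : Int) < 0) := by omega
    have htake1 : (PySem.Str.slice s none (some ((u.length : Int)))).toList = u := by
      rw [slice_to_bridge s _ u.length rfl]
      conv_lhs => rw [hstruct]
      exact List.take_left
    have hlookbr := get?_charIdx d (PySem.Str.slice s none (some ((u.length : Int))))
    rw [htake1] at hlookbr
    have hrest : (PySem.Str.slice s (some ((u.length : Int) + 1)) none).toList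
        = s.toList.drop (u.length + 1) :=
      slice_from_bridge s _ (u.length + 1) (by push_cast; ring)
    rcases hlook : lookupA (charIdx d) u with _ | secC
    · have hget : d.get? (PySem.Str.slice s none (some ((u.length : Int)))) = none := by
        rw [hlook] at hlookbr
        exact Option.map_eq_none_iff.mp hlookbr
      rw [show DcoreC s.toList (charIdx d) = s.toList by simp [DcoreC, hw1, hlook]]
      unfold DCoreStr
      rw [hf, if_neg hnneg, hget]
    · rw [hlook] at hlookbr
      obtain ⟨sec, hget, hsecL⟩ : ∃ sec, d.get? (PySem.Str.slice s none (some ((u.length : Int)))) = some sec ∧ sec.toList = secC := by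
        rcases hg : d.get? (PySem.Str.slice s none (some ((u.length : Int)))) with _ | sec
        · rw [hg] at hlookbr; cases hlookbr
        · rw [hg] at hlookbr; exact ⟨sec, rfl, Option.some.inj hlookbr⟩
      unfold DCoreStr
      rw [hf, if_neg hnneg, hget]
      change ((if (sec == "") = true then _ else _ : String)).toList = _
      by_cases hsec : secC = []
      · have hbeq : (sec == "") = true := by
          rw [beq_toList]
          simp [hsecL, hsec]
        rw [if_pos hbeq,
          show DcoreC s.toList (charIdx d) = s.toList.drop (u.length + 1) by
            simp [DcoreC, hw1, hlook, hsec]]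
        exact slice_from_bridge s _ (u.length + 1) (by push_cast; ring)
      · have hbeq : (sec == "") = false := by
          rw [beq_toList]
          simp only [decide_eq_false_iff_not]
          intro hh
          rw [show ("" : String).toList = [] from rfl] at hh
          exact hsec (hsecL ▸ hh)
        rw [if_neg (by rw [hbeq]; exact Bool.false_ne_true)]
        rcases hw2 : word1 (s.toList.drop (u.length + 1)) with _ | v
        · have hk : PySem.Str.find (PySem.Str.slice s (some ((u.length : Int) + 1)) none) " " = -1 := by
            rw [find_bridge, hrest]; exact find_space_none _ hw2
          rw [hk, if_neg (by norm_num),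
            show DcoreC s.toList (charIdx d) = s.toList by
              simp [DcoreC, hw1, hlook, if_neg hsec, hw2]]
        · obtain ⟨hstruct2, hv⟩ := word1_some _ v hw2
          have hk : PySem.Str.find (PySem.Str.slice s (some ((u.length : Int) + 1)) none) " "
              = (v.length : Int) := by
            rw [find_bridge, hrest]; exact find_space_some _ _ hw2
          have hmid : (PySem.Str.slice s (some ((u.length : Int) + 1))
              (some ((u.length : Int) + 1 + (v.length : Int)))).toList = v := by
            rw [slice_both_bridge s _ _ (u.length + 1) v.length (by push_cast; ring) (by push_cast; ring)]
            conv_lhs => rw [hstruct2]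
            exact List.take_left
          rw [hk, if_pos (by omega),
            show DcoreC s.toList (charIdx d)
              = (if v = secC then (s.toList.drop (u.length + 1)).drop (v.length + 1) else s.toList) by
              simp [DcoreC, hw1, hlook, if_neg hsec, hw2]]
          by_cases hveq : v = secC
          · have hbeq2 : (PySem.Str.slice s (some ((u.length : Int) + 1))
                (some ((u.length : Int) + 1 + (v.length : Int))) == sec) = true := by
              rw [beq_toList, hmid, hsecL, hveq]
              simp
            rw [if_pos hbeq2, if_pos hveq]
            rw [slice_from_bridge s _ (u.length + 1 + v.length + 1) (by push_cast; ring),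
              List.drop_drop]
            congr 1
          · have hbeq2 : (PySem.Str.slice s (some ((u.length : Int) + 1))
                (some ((u.length : Int) + 1 + (v.length : Int))) == sec) = false := by
              rw [beq_toList]
              simp only [decide_eq_false_iff_not]
              rw [hmid, hsecL]
              exact hveq
            rw [if_neg (by rw [hbeq2]; exact Bool.false_ne_true), if_neg hveq]

theorem cat_core (ps : List String) (d : PySem.Dict String String)
    (Hps : ∀ p ∈ ps.map String.toList, okP (charIdx d) p = true)
    (Hidx : ∀ e ∈ charIdx d, okE (ps.map String.toList) e = true)
    (s : String) : stripLoop s ps = DCoreStr s d := by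
  apply String.toList_inj.mp
  rw [stripLoop_toList, DCore_toList]
  exact scan_eq _ _ Hps Hidx s.toList

set_option maxRecDepth 16384 in
theorem core_armor (s : String) : stripLoop s reforgesArmor = DCoreStr s idxArmor :=
  cat_core _ _ (by decide) (by decide) s

set_option maxRecDepth 16384 in
theorem core_weapon (s : String) : stripLoop s reforgesWeapon = DCoreStr s idxWeapon :=
  cat_core _ _ (by decide) (by decide) s

set_option maxRecDepth 16384 in
theorem core_misc (s : String) : stripLoop s reforgesMisc = DCoreStr s idxMisc :=
  cat_core _ _ (by decide) (by decide) s

-- reductions of the two ports past the (identical) special-case guard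
theorem a_red (s c : String) (hnone : specialCases.get? s = none) :
    strip_reforge s c = stripLoop s (if c == "armor" then reforgesArmor
      else if c == "weapon" then reforgesWeapon else reforgesMisc) := by
  unfold strip_reforge
  rw [hnone]

theorem b_red (s c : String) (hnone : specialCases.get? s = none) :
    strip_reforge_alt s c = DCoreStr s
      ((reforgeIndex.get? c).getD ((reforgeIndex.get? "misc").getD PySem.Dict.empty)) := by
  unfold strip_reforge_alt
  rw [hnone]
  rfl

set_option maxRecDepth 16384 in
theorem reforgeIndex_mk : reforgeIndex
    = PySem.Dict.mk [("armor", idxArmor), ("weapon", idxWeapon), ("misc", idxMisc)] := by rfl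

theorem dict_get?_nil {κ ν : Type} [BEq κ] (x : κ) :
    (PySem.Dict.mk ([] : List (κ × ν))).get? x = none := rfl

theorem idx_sel_misc_some : reforgeIndex.get? "misc" = some idxMisc := by
  rw [reforgeIndex_mk, PySem.Dict.get?_mk_cons, PySem.Dict.get?_mk_cons, PySem.Dict.get?_mk_cons,
    show ("armor" == "misc") = false from by decide,
    show ("weapon" == "misc") = false from by decide,
    show ("misc" == "misc") = true from by decide]
  rfl

theorem idx_sel_armor :
    (reforgeIndex.get? "armor").getD ((reforgeIndex.get? "misc").getD PySem.Dict.empty) = idxArmor := by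
  have h : reforgeIndex.get? "armor" = some idxArmor := by
    rw [reforgeIndex_mk, PySem.Dict.get?_mk_cons, show ("armor" == "armor") = true from by decide]
    rfl
  rw [h]
  rfl

theorem idx_sel_weapon :
    (reforgeIndex.get? "weapon").getD ((reforgeIndex.get? "misc").getD PySem.Dict.empty) = idxWeapon := by
  have h : reforgeIndex.get? "weapon" = some idxWeapon := by
    rw [reforgeIndex_mk, PySem.Dict.get?_mk_cons, PySem.Dict.get?_mk_cons,
      show ("armor" == "weapon") = false from by decide,
      show ("weapon" == "weapon") = true from by decide]
    rfl
  rw [h]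
  rfl

set_option maxHeartbeats 1000000 in
theorem idx_lookup (c : String) (h1 : (c == "armor") = false) (h2 : (c == "weapon") = false) :
    (reforgeIndex.get? c).getD ((reforgeIndex.get? "misc").getD PySem.Dict.empty) = idxMisc := by
  by_cases hc : c = "misc"
  · subst hc
    rw [idx_sel_misc_some]; rfl
  · have hget : reforgeIndex.get? c = none := by
      rw [reforgeIndex_mk, PySem.Dict.get?_mk_cons, PySem.Dict.get?_mk_cons, PySem.Dict.get?_mk_cons]
      have e1 : ("armor" == c) = false := by
        simp only [beq_eq_false_iff_ne, ne_eq]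
        intro h; subst h; simp at h1
      have e2 : ("weapon" == c) = false := by
        simp only [beq_eq_false_iff_ne, ne_eq]
        intro h; subst h; simp at h2
      have e3 : ("misc" == c) = false := by
        simp only [beq_eq_false_iff_ne, ne_eq]
        intro h; exact hc h.symm
      rw [e1, e2, e3, if_neg Bool.false_ne_true, if_neg Bool.false_ne_true,
        if_neg Bool.false_ne_true]
      exact dict_get?_nil c
    rw [hget, idx_sel_misc_some]
    rfl

-- ===== VERDICT (by name: the statement is the Claim_ definition above) =====
theorem strip_reforge_spec : Claim_equal_strip_reforge := by
  unfold Claim_equal_strip_reforge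
  intro s c _
  unfold Spec_strip_reforge
  rcases hnone : specialCases.get? s with _ | v
  · rw [a_red s c hnone, b_red s c hnone]
    by_cases h1 : c = "armor"
    · subst h1
      rw [idx_sel_armor]
      simp only [beq_self_eq_true, if_true]
      exact core_armor s
    · by_cases h2 : c = "weapon"
      · subst h2
        rw [idx_sel_weapon]
        simp only [beq_self_eq_true, if_true, show (("weapon" : String) == "armor") = false by decide]
        exact core_weapon s
      · have hb1 : (c == "armor") = false := by
          simp only [beq_eq_false_iff_ne, ne_eq]; exact h1
        have hb2 : (c == "weapon") = false := by
          simp only [beq_eq_false_iff_ne, ne_eq]; exact h2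
        rw [idx_lookup c hb1 hb2, hb1, hb2]
        simp only [Bool.false_eq_true, if_false]
        exact core_misc s
  · unfold strip_reforge strip_reforge_alt
    rw [hnone]
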